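-- pv_equiv track=rewrite | github.com/Daerdemandt/Learning-bioinformatics | REAR/Solution.py | segmentise_perm
-- ===== SOURCE A (Python) =====
-- def segmentise_perm(perm):
-- 	result = []
-- 	capacitor = []
-- 	def monotonous_further(i):
-- 		return i + 1 < len(perm) and abs(perm[i + 1] - perm[i]) == 1
--
-- 	for i in range(len(perm)):
-- 		if len(capacitor) > 0:
-- 			capacitor.append(perm[i])
-- 			if not monotonous_further(i):# we can't switch from ascending to descending and keep diff == 1 because elements are unique
-- 				result.append(capacitor)
-- 				capacitor = []
-- 		else:
-- 			if monotonous_further(i):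
-- 				capacitor.append(perm[i])
-- 			else:
-- 				result.append([perm[i]])
-- 	return result
-- ===== SOURCE B (Python) =====
-- def segmentise_perm(perm):
-- 	result = []
-- 	for x in perm:
-- 		if result and abs(x - result[-1][-1]) == 1:
-- 			result[-1].append(x)
-- 		else:
-- 			result.append([x])
-- 	return result
-- ===== Notes on version B (the rewrite author's own statement) =====
-- stated objective: simpler
-- what changed: Replaced A's index loop with a lookahead helper and a flush-on-break 'capacitor' buffer by a direct look-back pass that extends the last output segment when the new element differs by 1 from its last element, else starts a new singleton segment.
import Mathlib
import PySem

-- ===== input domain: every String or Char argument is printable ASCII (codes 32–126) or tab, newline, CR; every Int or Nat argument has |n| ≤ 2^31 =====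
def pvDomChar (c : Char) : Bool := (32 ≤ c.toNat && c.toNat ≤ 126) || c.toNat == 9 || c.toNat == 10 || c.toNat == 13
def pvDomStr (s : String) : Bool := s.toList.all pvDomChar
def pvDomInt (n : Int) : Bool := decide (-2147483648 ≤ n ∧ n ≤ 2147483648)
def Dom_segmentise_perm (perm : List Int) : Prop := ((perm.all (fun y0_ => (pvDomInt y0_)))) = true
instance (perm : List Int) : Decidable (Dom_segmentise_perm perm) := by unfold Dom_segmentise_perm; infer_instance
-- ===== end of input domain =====

-- B replaces A's lookahead + flush 'capacitor' accumulator by look-back grouping that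
-- extends the last emitted segment in place (objective: simpler).

-- ===== PORT A =====
-- monotonous_further(i): i + 1 < len(perm) and abs(perm[i + 1] - perm[i]) == 1
def pvMono (perm : List Int) (i : Int) : Bool :=
  decide (i + 1 < (perm.length : Int)) &&
    ((PySem.List.pyGetD perm (i + 1) 0 - PySem.List.pyGetD perm i 0).natAbs == 1)

-- loop body over state (result, capacitor)
def pvStepA (perm : List Int) (st : List (List Int) × List Int) (i : Int) :
    List (List Int) × List Int :=
  let (result, capacitor) := st
  if capacitor.length > 0 then
    let capacitor := capacitor ++ [PySem.List.pyGetD perm i 0]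
    if !(pvMono perm i) then (result ++ [capacitor], []) else (result, capacitor)
  else
    if pvMono perm i then (result, capacitor ++ [PySem.List.pyGetD perm i 0])
    else (result ++ [[PySem.List.pyGetD perm i 0]], capacitor)

def segmentise_perm (perm : List Int) : List (List Int) :=
  ((PySem.List.pyRange 0 (perm.length : Int) 1).foldl (pvStepA perm) ([], [])).1

-- ===== PORT B =====
-- body of B's loop: extend result[-1] if abs(x - result[-1][-1]) == 1, else start [x]
def pvStepB (result : List (List Int)) (x : Int) : List (List Int) :=
  match result.getLast? with
  | none => result ++ [[x]]
  | some seg =>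
    match seg.getLast? with
    | none => result ++ [[x]]
    | some l => if (x - l).natAbs == 1 then result.dropLast ++ [seg ++ [x]]
                else result ++ [[x]]

def segmentise_perm_alt (perm : List Int) : List (List Int) :=
  perm.foldl pvStepB []

-- ===== PRECONDITION & SPEC =====
def Spec_segmentise_perm (perm : List Int) (out : List (List Int)) : Prop := out = segmentise_perm_alt perm
instance (perm : List Int) (out : List (List Int)) : Decidable (Spec_segmentise_perm perm out) := by unfold Spec_segmentise_perm; infer_instance

-- ===== CLAIM (what is proved, stated in full; the proofs are below) =====
def Claim_equal_segmentise_perm : Prop := ∀ (perm : List Int), Dom_segmentise_perm perm → Spec_segmentise_perm perm (segmentise_perm perm)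

-- ===== LEMMAS AND PROOFS =====

-- canonical grouping: go l cur xs = remaining segments, cur the open segment with last element l
def pvGo (l : Int) (cur : List Int) : List Int → List (List Int)
  | [] => [cur]
  | x :: xs => if (x - l).natAbs = 1 then pvGo x (cur ++ [x]) xs
               else cur :: pvGo x [x] xs

lemma pvStepB_eq (acc : List (List Int)) (cur : List Int) (l x : Int)
    (h : cur.getLast? = some l) :
    pvStepB (acc ++ [cur]) x =
      if (x - l).natAbs = 1 then acc ++ [cur ++ [x]] else (acc ++ [cur]) ++ [[x]] := by
  simp [pvStepB, h]

lemma B_loop (xs : List Int) : ∀ (acc : List (List Int)) (cur : List Int) (l : Int),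
    cur.getLast? = some l →
    List.foldl pvStepB (acc ++ [cur]) xs = acc ++ pvGo l cur xs := by
  induction xs with
  | nil => intro acc cur l h; simp [pvGo]
  | cons x xs ih =>
    intro acc cur l h
    simp only [List.foldl_cons, pvStepB_eq acc cur l x h, pvGo]
    by_cases hd : (x - l).natAbs = 1
    · simp only [hd, reduceIte]
      exact ih acc (cur ++ [x]) x (by simp)
    · simp only [hd, reduceIte]
      rw [List.append_assoc] at *
      have := ih (acc ++ [cur]) [x] x (by simp)
      simpa using this

lemma B_eq_go (x : Int) (xs : List Int) :
    segmentise_perm_alt (x :: xs) = pvGo x [x] xs := by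
  have h0 : pvStepB [] x = [] ++ [[x]] := by simp [pvStepB]
  simp only [segmentise_perm_alt, List.foldl_cons, h0]
  simpa using B_loop xs [] [x] x (by simp)

-- A's loop, simulated structurally: cap is the current capacitor, x the current element,
-- rest the untraversed tail
def pvASim (cap : List Int) (x : Int) : List Int → List (List Int)
  | [] => if cap.length > 0 then [cap ++ [x]] else [[x]]
  | y :: rest =>
    if (y - x).natAbs = 1 then
      if cap.length > 0 then pvASim (cap ++ [x]) y rest else pvASim [x] y rest
    else
      if cap.length > 0 then (cap ++ [x]) :: pvASim [] y rest
      else [x] :: pvASim [] y rest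

lemma pvGetD_drop (perm : List Int) (m : Nat) (x : Int) (rest : List Int)
    (h : perm.drop m = x :: rest) : PySem.List.pyGetD perm (m : Int) 0 = x := by
  have hh : (List.drop m perm).head? = perm[m]? := List.head?_drop
  rw [h] at hh
  simp [PySem.List.pyGetD_natCast, List.getD_eq_getElem?_getD, ← hh]

lemma pvMono_char (perm : List Int) (m : Nat) (x : Int) (rest : List Int)
    (h : perm.drop m = x :: rest) :
    pvMono perm (m : Int) =
      match rest with
      | [] => false
      | y :: _ => decide ((y - x).natAbs = 1) := by
  have hm : m < perm.length := by
    have := congrArg List.length h; simp at this; omega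
  cases rest with
  | nil =>
    have hlen : perm.length = m + 1 := by
      have := congrArg List.length h; simp at this; omega
    have hne : ¬ ((m : Int) + 1 < (perm.length : Int)) := by
      rw [hlen]; push_cast; omega
    simp [pvMono, hne]
  | cons y r =>
    have hdrop : perm.drop (m + 1) = y :: r := by
      have h1 : perm.drop (m + 1) = (perm.drop m).drop 1 := by rw [List.drop_drop]
      rw [h1, h]; simp
    have hy := pvGetD_drop perm (m + 1) y r hdrop
    have hx := pvGetD_drop perm m x (y :: r) h
    have hlen : m + 1 < perm.length := by
      have := congrArg List.length h; simp at this; omega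
    have hlt : ((m : Int) + 1 < (perm.length : Int)) := by exact_mod_cast hlen
    have hcast : (m : Int) + 1 = ((m + 1 : Nat) : Int) := by push_cast; ring
    have hx' : perm[m]?.getD 0 = x := by
      simpa [PySem.List.pyGetD_natCast, List.getD_eq_getElem?_getD] using hx
    simp only [pvMono]
    rw [hcast, hy]
    simp [hlt, hx']
    rw [Bool.eq_iff_iff]
    simp

lemma A_loop (rest : List Int) : ∀ (x : Int) (perm : List Int) (m : Nat)
    (res : List (List Int)) (cap : List Int),
    perm.drop m = x :: rest →
    ((PySem.List.pyRange (m : Int) (perm.length : Int) 1).foldl (pvStepA perm) (res, cap)).1 =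
      res ++ pvASim cap x rest := by
  induction rest with
  | nil =>
    intro x perm m res cap h
    have hlen : perm.length = m + 1 := by
      have := congrArg List.length h; simp at this; omega
    have hx := pvGetD_drop perm m x [] h
    have hmono := pvMono_char perm m x [] h
    rw [PySem.List.pyRange_one_cons (by exact_mod_cast by omega : (m : Int) < (perm.length : Int))]
    have hend : PySem.List.pyRange ((m : Int) + 1) (perm.length : Int) 1 = [] := by
      apply List.eq_nil_of_length_eq_zero
      rw [PySem.List.length_pyRange_one, hlen]
      push_cast; omega
    simp only [List.foldl_cons, hend, List.foldl_nil]
    by_cases hc : cap.length > 0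
    · simp [pvStepA, pvASim, hx, hmono, hc]
    · simp [pvStepA, pvASim, hx, hmono, hc]
  | cons y rest ih =>
    intro x perm m res cap h
    have hlen : m + 1 < perm.length := by
      have := congrArg List.length h; simp at this; omega
    have hx := pvGetD_drop perm m x (y :: rest) h
    have hdrop : perm.drop (m + 1) = y :: rest := by
      have : perm.drop (m+1) = (perm.drop m).drop 1 := by rw [List.drop_drop]
      rw [this, h]; simp
    have hmono := pvMono_char perm m x (y :: rest) h
    rw [PySem.List.pyRange_one_cons (by exact_mod_cast by omega : (m : Int) < (perm.length : Int))]
    have hcast : (m : Int) + 1 = ((m + 1 : Nat) : Int) := by push_cast; ring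
    simp only [List.foldl_cons, hcast]
    by_cases hd : (y - x).natAbs = 1
    · by_cases hc : cap.length > 0
      · have hstep : pvStepA perm (res, cap) (m : Int) = (res, cap ++ [x]) := by
          simp [pvStepA, hx, hmono, hc, hd]
        rw [hstep, ih y perm (m+1) res (cap ++ [x]) hdrop]
        simp [pvASim, hd, hc]
      · have hstep : pvStepA perm (res, cap) (m : Int) = (res, cap ++ [x]) := by
          simp [pvStepA, hx, hmono, hc, hd]
        have hcap : cap = [] := List.length_eq_zero_iff.mp (by omega)
        rw [hstep, hcap]
        rw [ih y perm (m+1) res ([] ++ [x]) hdrop]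
        simp [pvASim, hd]
    · by_cases hc : cap.length > 0
      · have hstep : pvStepA perm (res, cap) (m : Int) = (res ++ [cap ++ [x]], []) := by
          simp [pvStepA, hx, hmono, hc, hd]
        rw [hstep, ih y perm (m+1) (res ++ [cap ++ [x]]) [] hdrop]
        simp [pvASim, hd, hc]
      · have hstep : pvStepA perm (res, cap) (m : Int) = (res ++ [[x]], cap) := by
          simp [pvStepA, hx, hmono, hc, hd]
        have hcap : cap = [] := List.length_eq_zero_iff.mp (by omega)
        rw [hstep, hcap, ih y perm (m+1) (res ++ [[x]]) [] hdrop]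
        simp [pvASim, hd]

lemma ASim_eq_go (rest : List Int) : ∀ (cap : List Int) (x : Int),
    pvASim cap x rest = pvGo x (cap ++ [x]) rest := by
  induction rest with
  | nil => intro cap x; cases cap <;> simp [pvASim, pvGo]
  | cons y rest ih =>
    intro cap x
    by_cases hd : (y - x).natAbs = 1
    · cases cap <;> simp [pvASim, pvGo, hd, ih, List.append_assoc]
    · cases cap <;> simp [pvASim, pvGo, hd, ih]

-- ===== VERDICT (by name: the statement is the Claim_ definition above) =====
theorem segmentise_perm_spec : Claim_equal_segmentise_perm := by
  intro perm _
  unfold Spec_segmentise_perm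
  cases perm with
  | nil => rfl
  | cons x xs =>
    have hA := A_loop xs x (x :: xs) 0 [] [] (by simp)
    norm_num at hA
    rw [segmentise_perm]
    push_cast [List.length_cons]
    rw [hA, B_eq_go, ASim_eq_go]
    simp
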